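-- pv_equiv track=rewrite | github.com/Weegee5859/Personal_Dashboard | getdata.py | getWeatherIcon
-- ===== SOURCE A (Python) =====
-- def getWeatherIcon(forecast,day_or_night):
-- 	#SET WEATHER ICON
-- 	if any(x in forecast.lower() for x in ['partly cloudy','mostly cloudy','fair']):
-- 		icon = '02'
-- 	elif any(x in forecast.lower() for x in ['mostly sunny','sunny','clear']):
-- 		icon = '01'
-- 	elif any(x in forecast.lower() for x in ['thunderstorm','storm']):
-- 		icon = '11'
-- 	elif any(x in forecast.lower() for x in ['shower','rain']):
-- 		icon = '10'
-- 	elif any(x in forecast.lower() for x in ['partly','cloudy']):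
-- 		icon = '50'
-- 	else:
-- 		icon = 'unknown'
-- 	return icon+day_or_night
-- ===== SOURCE B (Python) =====
-- KEYWORDS = [("partly cloudy", 0), ("mostly cloudy", 0), ("fair", 0),
--             ("mostly sunny", 1), ("sunny", 1), ("clear", 1),
--             ("thunderstorm", 2), ("storm", 2),
--             ("shower", 3), ("rain", 3),
--             ("partly", 4), ("cloudy", 4)]
-- ICONS = ["02", "01", "11", "10", "50"]
--
-- def getWeatherIcon(forecast, day_or_night):
--     # One left-to-right scan of the lowered text: at each position, record the
--     # best (lowest) priority of any keyword starting there; index ICONS at the end.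
--     fl = forecast.lower()
--     best = 5
--     for i in range(len(fl)):
--         for kw, pri in KEYWORDS:
--             if pri < best and fl[i:i+len(kw)] == kw:
--                 best = pri
--     icon = ICONS[best] if best < 5 else "unknown"
--     return icon + day_or_night
-- ===== Notes on version B (the rewrite author's own statement) =====
-- stated objective: alternative
-- what changed: Replaces the priority-ordered elif chain of substring-containment tests by a single positional scan of the once-lowered text that, at each index, compares slices against a flat keyword->priority table and keeps the minimum matched priority, indexing an icon list at the end.
import Mathlib
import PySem

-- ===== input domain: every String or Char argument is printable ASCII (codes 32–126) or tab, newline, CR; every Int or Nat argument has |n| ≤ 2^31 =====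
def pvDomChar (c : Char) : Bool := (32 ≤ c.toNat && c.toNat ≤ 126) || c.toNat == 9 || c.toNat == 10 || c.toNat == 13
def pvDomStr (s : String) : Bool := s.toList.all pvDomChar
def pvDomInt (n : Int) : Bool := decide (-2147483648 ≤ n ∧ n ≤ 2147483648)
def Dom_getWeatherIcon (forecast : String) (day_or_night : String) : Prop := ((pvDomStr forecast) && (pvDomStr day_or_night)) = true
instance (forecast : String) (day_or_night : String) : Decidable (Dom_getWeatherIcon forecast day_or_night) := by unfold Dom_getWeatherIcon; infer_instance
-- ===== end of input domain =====

-- B replaces A's priority-ordered elif chain of substring tests by a single positional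
-- scan of the lowered text that accumulates the minimum priority of any keyword
-- occurrence (objective: alternative; not claimed faster).

-- ===== PORT A =====
-- literal transliteration: each elif re-lowercases the forecast, any() over the keyword list
def getWeatherIcon (forecast : String) (day_or_night : String) : String :=
  let icon : String :=
    if ["partly cloudy", "mostly cloudy", "fair"].any
        (fun x => PySem.Str.isIn x (PySem.Str.lower forecast)) then "02"
    else if ["mostly sunny", "sunny", "clear"].any
        (fun x => PySem.Str.isIn x (PySem.Str.lower forecast)) then "01"
    else if ["thunderstorm", "storm"].any
        (fun x => PySem.Str.isIn x (PySem.Str.lower forecast)) then "11"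
    else if ["shower", "rain"].any
        (fun x => PySem.Str.isIn x (PySem.Str.lower forecast)) then "10"
    else if ["partly", "cloudy"].any
        (fun x => PySem.Str.isIn x (PySem.Str.lower forecast)) then "50"
    else "unknown"
  icon ++ day_or_night

-- ===== PORT B =====
def pvKeywords : List (List Char × Nat) :=
  [("partly cloudy".toList, 0), ("mostly cloudy".toList, 0), ("fair".toList, 0),
   ("mostly sunny".toList, 1), ("sunny".toList, 1), ("clear".toList, 1),
   ("thunderstorm".toList, 2), ("storm".toList, 2),
   ("shower".toList, 3), ("rain".toList, 3),
   ("partly".toList, 4), ("cloudy".toList, 4)]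

def pvIcons : List String := ["02", "01", "11", "10", "50"]

-- fl[i:i+len(kw)] == kw
def pvMatchAt (cs : List Char) (i : Int) (kw : List Char) : Bool :=
  PySem.List.slice cs (some i) (some (i + kw.length)) == kw

-- the nested for-loops of Source B: min-priority accumulator over text positions
def pvScan (cs : List Char) : Nat :=
  (PySem.List.pyRange 0 cs.length 1).foldl
    (fun best i => pvKeywords.foldl
      (fun b p => if decide (p.2 < b) && pvMatchAt cs i p.1 then p.2 else b) best) 5

def getWeatherIcon_alt (forecast : String) (day_or_night : String) : String :=
  let cs := PySem.Chars.lower forecast.toList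
  let best := pvScan cs
  (if best < 5 then pvIcons.getD best "unknown" else "unknown") ++ day_or_night

-- ===== PRECONDITION & SPEC =====
def Spec_getWeatherIcon (forecast : String) (day_or_night : String) (out : String) : Prop := out = getWeatherIcon_alt forecast day_or_night
instance (forecast : String) (day_or_night : String) (out : String) : Decidable (Spec_getWeatherIcon forecast day_or_night out) := by unfold Spec_getWeatherIcon; infer_instance

-- ===== CLAIM =====
def Claim_equal_getWeatherIcon : Prop := ∀ (forecast : String) (day_or_night : String), Dom_getWeatherIcon forecast day_or_night → Spec_getWeatherIcon forecast day_or_night (getWeatherIcon forecast day_or_night)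

-- ===== LEMMAS AND PROOFS =====

-- the inner-loop step is a conditional min-update
lemma pvStep_eq (cs : List Char) (i : Int) (b : Nat) (p : List Char × Nat) :
    (if decide (p.2 < b) && pvMatchAt cs i p.1 then p.2 else b)
      = if pvMatchAt cs i p.1 then min b p.2 else b := by
  by_cases h : pvMatchAt cs i p.1 = true <;> by_cases h2 : p.2 < b <;>
    simp [h, h2] <;> omega

-- generic facts about a min-update fold
lemma foldl_min_le_init {α : Type} (q : α → Bool) (w : α → Nat) (l : List α) (b : Nat) :
    l.foldl (fun b x => if q x then min b (w x) else b) b ≤ b := by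
  induction l generalizing b with
  | nil => simp
  | cons x xs ih =>
      simp only [List.foldl_cons]
      by_cases h : q x = true <;> simp [h]
      · exact le_trans (ih _) (Nat.min_le_left _ _)
      · exact ih _

lemma foldl_min_le_mem {α : Type} (q : α → Bool) (w : α → Nat) (l : List α) (b : Nat)
    (x : α) (hx : x ∈ l) (hq : q x = true) :
    l.foldl (fun b x => if q x then min b (w x) else b) b ≤ w x := by
  induction l generalizing b with
  | nil => simp at hx
  | cons y ys ih =>
      simp only [List.foldl_cons]
      rcases List.mem_cons.1 hx with rfl | hx'
      · simp [hq]
        exact le_trans (foldl_min_le_init _ _ _ _) (Nat.min_le_right _ _)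
      · by_cases h : q y = true <;> simp [h] <;> exact ih _ hx'

lemma foldl_min_cases {α : Type} (q : α → Bool) (w : α → Nat) (l : List α) (b : Nat) :
    l.foldl (fun b x => if q x then min b (w x) else b) b = b ∨
      ∃ x ∈ l, q x = true ∧
        l.foldl (fun b x => if q x then min b (w x) else b) b = w x := by
  induction l generalizing b with
  | nil => simp
  | cons y ys ih =>
      simp only [List.foldl_cons]
      by_cases h : q y = true
      · simp only [h, if_true]
        rcases ih (min b (w y)) with heq | ⟨x, hx, hqx, heq⟩
        · rcases Nat.le_total b (w y) with hle | hle
          · left; rw [heq]; omega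
          · right; exact ⟨y, List.mem_cons_self, h, by rw [heq]; omega⟩
        · right; exact ⟨x, List.mem_cons_of_mem _ hx, hqx, heq⟩
      · simp only [h]
        rcases ih b with heq | ⟨x, hx, hqx, heq⟩
        · left; exact heq
        · right; exact ⟨x, List.mem_cons_of_mem _ hx, hqx, heq⟩

-- pvScan rewritten as a single min-update fold over position × keyword pairs
def pvPairs (cs : List Char) : List (Int × (List Char × Nat)) :=
  (PySem.List.pyRange 0 cs.length 1).flatMap (fun i => pvKeywords.map (fun p => (i, p)))

lemma foldl_step_eq (cs : List Char) (i : Int) (l : List (List Char × Nat)) (b : Nat) :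
    l.foldl (fun b p => if decide (p.2 < b) && pvMatchAt cs i p.1 then p.2 else b) b
      = l.foldl (fun b p => if pvMatchAt cs i p.1 then min b p.2 else b) b := by
  simp only [pvStep_eq]

lemma foldl_outer_eq (cs : List Char) (l : List Int) (b : Nat) :
    l.foldl (fun best i => pvKeywords.foldl
        (fun b p => if decide (p.2 < b) && pvMatchAt cs i p.1 then p.2 else b) best) b
      = (l.flatMap (fun i => pvKeywords.map (fun p => (i, p)))).foldl
        (fun b x => if pvMatchAt cs x.1 x.2.1 then min b x.2.2 else b) b := by
  induction l generalizing b with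
  | nil => rfl
  | cons i is ih =>
      simp only [List.foldl_cons, List.flatMap_cons, List.foldl_append, List.foldl_map]
      rw [foldl_step_eq]
      exact ih _

lemma pvScan_eq_pairs (cs : List Char) :
    pvScan cs = (pvPairs cs).foldl
      (fun b x => if pvMatchAt cs x.1 x.2.1 then min b x.2.2 else b) 5 := by
  unfold pvScan pvPairs
  exact foldl_outer_eq cs _ 5

-- membership in pvPairs ↔ position in range and keyword in table
lemma mem_pvPairs (cs : List Char) (i : Int) (p : List Char × Nat) :
    (i, p) ∈ pvPairs cs ↔ (0 ≤ i ∧ i < (cs.length : Int)) ∧ p ∈ pvKeywords := by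
  unfold pvPairs
  rw [List.mem_flatMap]
  constructor
  · rintro ⟨j, hj, hmem⟩
    rw [List.mem_map] at hmem
    rcases hmem with ⟨p', hp', heq⟩
    cases heq
    exact ⟨(PySem.List.mem_pyRange_one).1 hj, hp'⟩
  · rintro ⟨⟨h0, h1⟩, hp⟩
    exact ⟨i, (PySem.List.mem_pyRange_one).2 ⟨h0, h1⟩, List.mem_map.2 ⟨p, hp, rfl⟩⟩

lemma pvMatchAt_iff (cs kw : List Char) (i : Nat) :
    pvMatchAt cs (i : Int) kw = true ↔ kw <+: cs.drop i := by
  unfold pvMatchAt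
  have hc : ((i : Int) + (kw.length : Int)) = ((i + kw.length : Nat) : Int) := by push_cast; ring
  rw [hc, PySem.List.slice_natCast]
  have h2 : i + kw.length - i = kw.length := by omega
  rw [h2, beq_iff_eq]
  constructor
  · intro h
    rw [← h]
    exact List.take_prefix _ _
  · intro h
    exact (List.prefix_iff_eq_take.1 h).symm

-- isIn keyword ↔ a matching position exists in the scanned range (keyword nonempty)
lemma pvIsIn_iff (cs kw : List Char) (hkw : kw ≠ []) :
    PySem.Chars.isIn kw cs = true ↔
      ∃ i : Nat, i < cs.length ∧ pvMatchAt cs (i : Int) kw = true := by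
  rw [← PySem.Chars.exists_prefix_drop_iff_isIn]
  constructor
  · rintro ⟨j, hj⟩
    refine ⟨j, ?_, (pvMatchAt_iff cs kw j).2 hj⟩
    have hlen := hj.length_le
    have hk : 0 < kw.length := List.length_pos_iff.2 hkw
    simp [List.length_drop] at hlen
    omega
  · rintro ⟨i, _, hm⟩
    exact ⟨i, (pvMatchAt_iff cs kw i).1 hm⟩

-- group-g membership test on the A side, stated over the char list
def pvGrp (cs : List Char) (g : Nat) : Prop :=
  ∃ p ∈ pvKeywords, p.2 = g ∧ PySem.Chars.isIn p.1 cs = true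

-- pvScan ≤ g whenever group g has a match
lemma pvScan_le_of_grp (cs : List Char) (g : Nat) (h : pvGrp cs g) : pvScan cs ≤ g := by
  rcases h with ⟨p, hp, hpg, hin⟩
  have hne : p.1 ≠ [] := by
    revert hpg; simp [pvKeywords] at hp
    rcases hp with h|h|h|h|h|h|h|h|h|h|h|h <;> rw [h] <;> intro _ <;> decide
  rcases (pvIsIn_iff cs p.1 hne).1 hin with ⟨i, hi, hm⟩
  have hmem : ((i : Int), p) ∈ pvPairs cs := (mem_pvPairs cs i p).2
    ⟨⟨Int.natCast_nonneg i, by exact_mod_cast hi⟩, hp⟩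
  have h' : pvScan cs ≤ p.2 := by
    rw [pvScan_eq_pairs]
    exact foldl_min_le_mem _ _ (pvPairs cs) 5 ((i : Int), p) hmem hm
  omega

-- pvScan is 5 or the priority of some matched group
lemma pvScan_cases (cs : List Char) : pvScan cs = 5 ∨ pvGrp cs (pvScan cs) := by
  rcases foldl_min_cases (fun x => pvMatchAt cs x.1 x.2.1) (fun x => x.2.2)
      (pvPairs cs) 5 with heq | ⟨x, hx, hqx, heq⟩
  · left; rw [pvScan_eq_pairs]; exact heq
  · right
    obtain ⟨i, p⟩ := x
    have hmem := (mem_pvPairs cs i p).1 hx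
    refine ⟨p, hmem.2, by rw [pvScan_eq_pairs]; exact heq.symm, ?_⟩
    have hi0 : 0 ≤ i := hmem.1.1
    obtain ⟨j, rfl⟩ := Int.eq_ofNat_of_zero_le hi0
    rw [← PySem.Chars.exists_prefix_drop_iff_isIn]
    exact ⟨j, (pvMatchAt_iff cs p.1 j).1 hqx⟩

-- any matched group is one of the five boolean tests of A
lemma pvGrp_cases (cs : List Char) (k : Nat) (hk : pvGrp cs k) :
    (k = 0 ∧ (PySem.Chars.isIn "partly cloudy".toList cs || (PySem.Chars.isIn "mostly cloudy".toList cs || PySem.Chars.isIn "fair".toList cs)) = true)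
  ∨ (k = 1 ∧ (PySem.Chars.isIn "mostly sunny".toList cs || (PySem.Chars.isIn "sunny".toList cs || PySem.Chars.isIn "clear".toList cs)) = true)
  ∨ (k = 2 ∧ (PySem.Chars.isIn "thunderstorm".toList cs || PySem.Chars.isIn "storm".toList cs) = true)
  ∨ (k = 3 ∧ (PySem.Chars.isIn "shower".toList cs || PySem.Chars.isIn "rain".toList cs) = true)
  ∨ (k = 4 ∧ (PySem.Chars.isIn "partly".toList cs || PySem.Chars.isIn "cloudy".toList cs) = true) := by
  rcases hk with ⟨p, hp, hpg, hin⟩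
  simp only [pvKeywords, List.mem_cons, List.not_mem_nil, or_false] at hp
  rcases hp with h|h|h|h|h|h|h|h|h|h|h|h <;> subst h <;> simp_all

-- ===== VERDICT =====
theorem getWeatherIcon_spec : Claim_equal_getWeatherIcon := by
  intro forecast day_or_night _
  unfold Spec_getWeatherIcon getWeatherIcon getWeatherIcon_alt
  set cs := PySem.Chars.lower forecast.toList with hcs
  have hbridge : ∀ x : String, PySem.Str.isIn x (PySem.Str.lower forecast)
      = PySem.Chars.isIn x.toList cs := by
    intro x
    apply Bool.eq_iff_iff.mpr
    rw [PySem.Str.isIn_iff_infix, PySem.Chars.isIn_iff_infix, PySem.Str.toList_lower, ← hcs]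
  simp only [List.any_cons, List.any_nil, hbridge, Bool.or_false]
  by_cases h0 : (PySem.Chars.isIn "partly cloudy".toList cs || (PySem.Chars.isIn "mostly cloudy".toList cs || PySem.Chars.isIn "fair".toList cs)) = true
  case pos =>
    have hg : pvGrp cs 0 := by
      simp only [Bool.or_eq_true] at h0
      rcases h0 with h|h|h
      · exact ⟨("partly cloudy".toList, 0), by simp [pvKeywords], rfl, h⟩
      · exact ⟨("mostly cloudy".toList, 0), by simp [pvKeywords], rfl, h⟩
      · exact ⟨("fair".toList, 0), by simp [pvKeywords], rfl, h⟩
    have hle := pvScan_le_of_grp cs 0 hg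
    have hs : pvScan cs = 0 := by omega
    rw [if_pos h0, hs]; simp [pvIcons]
  case neg =>
  by_cases h1 : (PySem.Chars.isIn "mostly sunny".toList cs || (PySem.Chars.isIn "sunny".toList cs || PySem.Chars.isIn "clear".toList cs)) = true
  case pos =>
    have hg : pvGrp cs 1 := by
      simp only [Bool.or_eq_true] at h1
      rcases h1 with h|h|h
      · exact ⟨("mostly sunny".toList, 1), by simp [pvKeywords], rfl, h⟩
      · exact ⟨("sunny".toList, 1), by simp [pvKeywords], rfl, h⟩
      · exact ⟨("clear".toList, 1), by simp [pvKeywords], rfl, h⟩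
    have hle := pvScan_le_of_grp cs 1 hg
    have hs : pvScan cs = 1 := by
      rcases pvScan_cases cs with h5 | hgm
      · omega
      · rcases pvGrp_cases cs _ hgm with ⟨hk, hb⟩|⟨hk, hb⟩|⟨hk, hb⟩|⟨hk, hb⟩|⟨hk, hb⟩
        · exact absurd hb h0
        · omega
        · omega
        · omega
        · omega
    rw [if_neg h0, if_pos h1, hs]; simp [pvIcons]
  case neg =>
  by_cases h2 : (PySem.Chars.isIn "thunderstorm".toList cs || PySem.Chars.isIn "storm".toList cs) = true
  case pos =>
    have hg : pvGrp cs 2 := by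
      simp only [Bool.or_eq_true] at h2
      rcases h2 with h|h
      · exact ⟨("thunderstorm".toList, 2), by simp [pvKeywords], rfl, h⟩
      · exact ⟨("storm".toList, 2), by simp [pvKeywords], rfl, h⟩
    have hle := pvScan_le_of_grp cs 2 hg
    have hs : pvScan cs = 2 := by
      rcases pvScan_cases cs with h5 | hgm
      · omega
      · rcases pvGrp_cases cs _ hgm with ⟨hk, hb⟩|⟨hk, hb⟩|⟨hk, hb⟩|⟨hk, hb⟩|⟨hk, hb⟩
        · exact absurd hb h0
        · exact absurd hb h1
        · omega
        · omega
        · omega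
    rw [if_neg h0, if_neg h1, if_pos h2, hs]; simp [pvIcons]
  case neg =>
  by_cases h3 : (PySem.Chars.isIn "shower".toList cs || PySem.Chars.isIn "rain".toList cs) = true
  case pos =>
    have hg : pvGrp cs 3 := by
      simp only [Bool.or_eq_true] at h3
      rcases h3 with h|h
      · exact ⟨("shower".toList, 3), by simp [pvKeywords], rfl, h⟩
      · exact ⟨("rain".toList, 3), by simp [pvKeywords], rfl, h⟩
    have hle := pvScan_le_of_grp cs 3 hg
    have hs : pvScan cs = 3 := by
      rcases pvScan_cases cs with h5 | hgm
      · omega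
      · rcases pvGrp_cases cs _ hgm with ⟨hk, hb⟩|⟨hk, hb⟩|⟨hk, hb⟩|⟨hk, hb⟩|⟨hk, hb⟩
        · exact absurd hb h0
        · exact absurd hb h1
        · exact absurd hb h2
        · omega
        · omega
    rw [if_neg h0, if_neg h1, if_neg h2, if_pos h3, hs]; simp [pvIcons]
  case neg =>
  by_cases h4 : (PySem.Chars.isIn "partly".toList cs || PySem.Chars.isIn "cloudy".toList cs) = true
  case pos =>
    have hg : pvGrp cs 4 := by
      simp only [Bool.or_eq_true] at h4
      rcases h4 with h|h
      · exact ⟨("partly".toList, 4), by simp [pvKeywords], rfl, h⟩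
      · exact ⟨("cloudy".toList, 4), by simp [pvKeywords], rfl, h⟩
    have hle := pvScan_le_of_grp cs 4 hg
    have hs : pvScan cs = 4 := by
      rcases pvScan_cases cs with h5 | hgm
      · omega
      · rcases pvGrp_cases cs _ hgm with ⟨hk, hb⟩|⟨hk, hb⟩|⟨hk, hb⟩|⟨hk, hb⟩|⟨hk, hb⟩
        · exact absurd hb h0
        · exact absurd hb h1
        · exact absurd hb h2
        · exact absurd hb h3
        · omega
    rw [if_neg h0, if_neg h1, if_neg h2, if_neg h3, if_pos h4, hs]; simp [pvIcons]
  case neg =>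
    have hs : pvScan cs = 5 := by
      rcases pvScan_cases cs with h5 | hgm
      · exact h5
      · rcases pvGrp_cases cs _ hgm with ⟨hk, hb⟩|⟨hk, hb⟩|⟨hk, hb⟩|⟨hk, hb⟩|⟨hk, hb⟩
        · exact absurd hb h0
        · exact absurd hb h1
        · exact absurd hb h2
        · exact absurd hb h3
        · exact absurd hb h4
    rw [if_neg h0, if_neg h1, if_neg h2, if_neg h3, if_neg h4, hs]; simp
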